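-- pv_equiv track=rewrite | github.com/Arsen1302/Code-copy-detector | TestData/solutions/problem_1674_4_1.py | solution_1674_4_1
-- ===== SOURCE A (Python) =====
-- from typing import List
--
-- def solution_1674_4_1(words: List[str]) -> List[int]:
--     trie = {}
--
--     def solution_1674_4_2(trie, word):
--         for i in range(len(word)):
--             letter = word[i]
--             if letter in trie:
--                 trie[letter]['count'] += 1
--             else:
--                 trie[letter] = {}
--                 trie[letter]['count'] = 1
--             trie = trie[letter]
--
--     for word in words: solution_1674_4_2(trie, word)
--
--     def solution_1674_4_3(trie, word):
--         count = 0
--         for i in range(len(word)):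
--             letter = word[i]
--             count += trie[letter]['count']
--             trie = trie[letter]
--         return count
--
--     output = []
--     for word in words:
--         output.append(solution_1674_4_3(trie, word))
--     return output
-- ===== SOURCE B (Python) =====
-- from typing import List
--
-- def solution_1674_4_1(words: List[str]) -> List[int]:
--     counts = {}
--     for word in words:
--         for i in range(len(word)):
--             p = word[:i + 1]
--             counts[p] = counts.get(p, 0) + 1
--     return [sum(counts[word[:i + 1]] for i in range(len(word))) for word in words]
-- ===== Notes on version B (the rewrite author's own statement) =====
-- stated objective: idiomatic
-- what changed: Replaces the hand-rolled trie of nested per-letter dict nodes with one flat dict counting full prefix strings: phase 1 increments counts[word[:i+1]] for every word and position, phase 2 sums those counts per word, so no tree is built or descended.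
import Mathlib
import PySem

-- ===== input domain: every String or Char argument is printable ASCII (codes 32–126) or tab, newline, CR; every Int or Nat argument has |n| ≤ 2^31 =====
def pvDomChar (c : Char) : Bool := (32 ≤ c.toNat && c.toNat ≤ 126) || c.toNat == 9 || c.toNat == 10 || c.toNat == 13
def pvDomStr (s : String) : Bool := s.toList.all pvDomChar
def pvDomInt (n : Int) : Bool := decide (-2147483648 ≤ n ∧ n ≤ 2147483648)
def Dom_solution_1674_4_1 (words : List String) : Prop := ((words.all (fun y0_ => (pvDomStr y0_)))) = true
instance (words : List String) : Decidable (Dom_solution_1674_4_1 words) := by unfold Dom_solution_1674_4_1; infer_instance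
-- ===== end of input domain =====

-- B replaces A's nested per-letter trie of dicts by ONE flat dict counting full prefix strings (idiomatic two-phase count-then-sum); return values agree on all inputs.

-- ===== PORT A =====
-- A's nested-dict trie: each node holds its 'count' and a dict of child letters
-- (mutual pair instead of a nested inductive, as required).
mutual
inductive PvTrie where
  | node : Int → PvChildren → PvTrie
deriving Repr
inductive PvChildren where
  | nil : PvChildren
  | cons : Char → PvTrie → PvChildren → PvChildren
deriving Repr
end

-- 'letter in trie' / 'trie[letter]' on the children dict
def pvFind? : PvChildren → Char → Option PvTrie
  | .nil, _ => none
  | .cons c t rest, l => if l = c then some t else pvFind? rest l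

-- 'trie[letter] = …' (overwrite in place, append if new — dict insertion order)
def pvSet : PvChildren → Char → PvTrie → PvChildren
  | .nil, l, t => .cons l t .nil
  | .cons c t0 rest, l, t => if l = c then .cons c t rest else .cons c t0 (pvSet rest l t)

-- solution_1674_4_2: walk down the word, incrementing (or creating) each child's count
def pvInsert : PvTrie → List Char → PvTrie
  | t, [] => t
  | .node c ch, l :: ls =>
    match pvFind? ch l with
    | some (.node cc cch) => .node c (pvSet ch l (pvInsert (.node (cc + 1) cch) ls))
    | none => .node c (pvSet ch l (pvInsert (.node 1 .nil) ls))

-- solution_1674_4_3: walk down the word, summing counts; the 'none' branch is Python's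
-- KeyError and is unreachable here because every queried word was inserted first.
def pvQuery : PvTrie → List Char → Int
  | _, [] => 0
  | .node _ ch, l :: ls =>
    match pvFind? ch l with
    | some t' => (match t' with | .node cc _ => cc) + pvQuery t' ls
    | none => 0

def solution_1674_4_1 (words : List String) : List Int :=
  let trie := words.foldl (fun t w => pvInsert t w.toList) (.node 0 .nil)
  words.map (fun w => pvQuery trie w.toList)

-- ===== PORT B =====
-- Source B: one flat dict counting every prefix word[:i+1], then a sum of lookups per word.
def solution_1674_4_1_alt (words : List String) : List Int :=
  let counts : PySem.Dict (List Char) Int :=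
    words.foldl (fun d w =>
      (PySem.List.pyRange 0 (PySem.Str.len w) 1).foldl (fun d i =>
        let p := PySem.List.slice w.toList none (some (i + 1))
        d.insert p (d.getD p 0 + 1)) d) PySem.Dict.empty
  words.map (fun w =>
    (PySem.List.pyRange 0 (PySem.Str.len w) 1).foldl (fun acc i =>
      acc + counts.getD (PySem.List.slice w.toList none (some (i + 1))) 0) 0)

-- ===== PRECONDITION & SPEC =====
def Spec_solution_1674_4_1 (words : List String) (out : List Int) : Prop := out = solution_1674_4_1_alt words
instance (words : List String) (out : List Int) : Decidable (Spec_solution_1674_4_1 words out) := by unfold Spec_solution_1674_4_1; infer_instance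

-- ===== CLAIM (what is proved, stated in full; the proofs are below) =====
def Claim_equal_solution_1674_4_1 : Prop := ∀ (words : List String), Dom_solution_1674_4_1 words → Spec_solution_1674_4_1 words (solution_1674_4_1 words)

-- ===== LEMMAS AND PROOFS =====

-- root count of a trie
def pvCnt : PvTrie → Int | .node c _ => c

-- node reached by a path, if it exists
def pvNodeAt? : PvTrie → List Char → Option PvTrie
  | t, [] => some t
  | .node _ ch, l :: ls =>
    match pvFind? ch l with
    | some t' => pvNodeAt? t' ls
    | none => none

-- count stored at a path (0 if absent)
def pvCntAt (t : PvTrie) (p : List Char) : Int :=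
  match pvNodeAt? t p with
  | some t' => pvCnt t'
  | none => 0

-- the list of nonempty prefixes of a word
def pvPrefixes (cs : List Char) : List (List Char) :=
  (List.range cs.length).map (fun i => cs.take (i + 1))

theorem pvInsert_cons (c : Int) (ch : PvChildren) (l : Char) (ls : List Char) :
    pvInsert (.node c ch) (l :: ls) =
      match pvFind? ch l with
      | some (.node cc cch) => .node c (pvSet ch l (pvInsert (.node (cc + 1) cch) ls))
      | none => .node c (pvSet ch l (pvInsert (.node 1 .nil) ls)) := rfl

theorem pvFind?_set (ch : PvChildren) (a b : Char) (t : PvTrie) :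
    pvFind? (pvSet ch a t) b = if b = a then some t else pvFind? ch b :=
  match ch with
  | .nil => by simp [pvSet, pvFind?]
  | .cons c t0 rest => by
    have ih := pvFind?_set rest a b t
    by_cases hac : a = c
    · subst hac
      rw [show pvSet (.cons a t0 rest) a t = .cons a t rest from by simp [pvSet]]
      by_cases hbc : b = a <;> simp [pvFind?, hbc]
    · rw [show pvSet (.cons c t0 rest) a t = .cons c t0 (pvSet rest a t) from by
        simp [pvSet, hac]]
      by_cases hbc : b = c
      · simp [pvFind?, hbc]
        exact fun h => absurd h (fun hca => hac hca.symm)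
      · simp [pvFind?, hbc, ih]

theorem pvCnt_insert (t : PvTrie) (w : List Char) : pvCnt (pvInsert t w) = pvCnt t := by
  cases w with
  | nil => cases t <;> rfl
  | cons l ls =>
    cases t with
    | node c ch =>
      rw [pvInsert_cons]
      cases h : pvFind? ch l with
      | some t' => cases t' <;> rfl
      | none => rfl

theorem pvCntAt_found (x : Int) (ch : PvChildren) (b : Char) (bs : List Char) (t' : PvTrie)
    (h : pvFind? ch b = some t') : pvCntAt (.node x ch) (b :: bs) = pvCntAt t' bs := by
  simp [pvCntAt, pvNodeAt?, h]

theorem pvCntAt_none (x : Int) (ch : PvChildren) (b : Char) (bs : List Char)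
    (h : pvFind? ch b = none) : pvCntAt (.node x ch) (b :: bs) = 0 := by
  simp [pvCntAt, pvNodeAt?, h]

theorem pvCntAt_irrel (x y : Int) (ch : PvChildren) (b : Char) (bs : List Char) :
    pvCntAt (.node x ch) (b :: bs) = pvCntAt (.node y ch) (b :: bs) := by
  cases h : pvFind? ch b with
  | some t' => rw [pvCntAt_found _ _ _ _ _ h, pvCntAt_found _ _ _ _ _ h]
  | none => rw [pvCntAt_none _ _ _ _ h, pvCntAt_none _ _ _ _ h]

theorem pvCntAt_insert (p w : List Char) (t : PvTrie) :
    pvCntAt (pvInsert t w) p = pvCntAt t p + (if p ≠ [] ∧ p <+: w then 1 else 0) := by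
  induction p generalizing t w with
  | nil =>
    simp only [pvCntAt, pvNodeAt?]
    simpa using pvCnt_insert t w
  | cons b bs ih =>
    cases w with
    | nil => simp [pvInsert]
    | cons a as =>
      cases t with
      | node c ch =>
        by_cases hba : b = a
        · subst hba
          cases hf : pvFind? ch b with
          | some t' =>
            cases t' with
            | node cc cch =>
              have hfs : pvFind? (pvSet ch b (pvInsert (.node (cc + 1) cch) as)) b =
                  some (pvInsert (.node (cc + 1) cch) as) := by rw [pvFind?_set]; simp
              rw [pvInsert_cons, hf, pvCntAt_found _ _ _ _ _ hfs, ih,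
                  pvCntAt_found _ _ _ _ _ hf]
              cases bs with
              | nil => simp [pvCntAt, pvNodeAt?, pvCnt]
              | cons b2 bs2 =>
                rw [pvCntAt_irrel (cc + 1) cc]
                simp [List.cons_prefix_cons]
          | none =>
            have hfs : pvFind? (pvSet ch b (pvInsert (.node 1 .nil) as)) b =
                some (pvInsert (.node 1 .nil) as) := by rw [pvFind?_set]; simp
            rw [pvInsert_cons, hf, pvCntAt_found _ _ _ _ _ hfs, ih,
                pvCntAt_none _ _ _ _ hf]
            cases bs with
            | nil => simp [pvCntAt, pvNodeAt?, pvCnt]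
            | cons b2 bs2 =>
              rw [pvCntAt_none _ _ _ _ (by simp [pvFind?])]
              simp [List.cons_prefix_cons]
        · have hnp : ¬ (b :: bs <+: a :: as) := by
            rw [List.cons_prefix_cons]; rintro ⟨h, -⟩; exact hba h
          have hins : ∃ newch, pvInsert (.node c ch) (a :: as) = .node c (pvSet ch a newch) := by
            rw [pvInsert_cons]
            cases hf : pvFind? ch a with
            | some t' => cases t' with | node cc cch => exact ⟨_, rfl⟩
            | none => exact ⟨_, rfl⟩
          obtain ⟨newch, hins⟩ := hins
          rw [hins, if_neg (by simp [hnp])]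
          cases hfb : pvFind? ch b with
          | some tb =>
            rw [pvCntAt_found _ _ _ _ tb (by rw [pvFind?_set, if_neg hba]; exact hfb),
                pvCntAt_found _ _ _ _ tb hfb]
            ring
          | none =>
            rw [pvCntAt_none _ _ _ _ (by rw [pvFind?_set, if_neg hba]; exact hfb),
                pvCntAt_none _ _ _ _ hfb]
            ring

theorem pvNodeAt?_insert_isSome (p w : List Char) (t : PvTrie)
    (h : p <+: w ∨ (pvNodeAt? t p).isSome) : (pvNodeAt? (pvInsert t w) p).isSome := by
  induction p generalizing t w with
  | nil => simp [pvNodeAt?]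
  | cons b bs ih =>
    cases w with
    | nil =>
      rcases h with h | h
      · simp at h
      · cases t <;> simpa [pvInsert] using h
    | cons a as =>
      cases t with
      | node c ch =>
        by_cases hba : b = a
        · subst hba
          cases hf : pvFind? ch b with
          | some t' =>
            cases t' with
            | node cc cch =>
              rw [pvInsert_cons, hf]
              simp only [pvNodeAt?, pvFind?_set]
              apply ih
              rcases h with h | h
              · exact Or.inl (by simpa [List.cons_prefix_cons] using h)
              · simp only [pvNodeAt?, hf] at h
                cases bs with
                | nil => exact Or.inr (by simp [pvNodeAt?])
                | cons b2 bs2 => exact Or.inr (by simpa [pvNodeAt?] using h)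
          | none =>
            rw [pvInsert_cons, hf]
            simp only [pvNodeAt?, pvFind?_set]
            apply ih
            rcases h with h | h
            · exact Or.inl (by simpa [List.cons_prefix_cons] using h)
            · simp [pvNodeAt?, hf] at h
        · have hins : ∃ newch, pvInsert (.node c ch) (a :: as) = .node c (pvSet ch a newch) := by
            rw [pvInsert_cons]
            cases hf : pvFind? ch a with
            | some t' => cases t' with | node cc cch => exact ⟨_, rfl⟩
            | none => exact ⟨_, rfl⟩
          obtain ⟨newch, hins⟩ := hins
          rw [hins]
          simp only [pvNodeAt?, pvFind?_set, if_neg hba]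
          rcases h with h | h
          · rw [List.cons_prefix_cons] at h; exact absurd h.1 hba
          · simpa [pvNodeAt?] using h

theorem pvPrefixes_cons (a : Char) (as : List Char) :
    pvPrefixes (a :: as) = [a] :: (pvPrefixes as).map (a :: ·) := by
  simp only [pvPrefixes, List.length_cons, List.range_succ_eq_map, List.map_cons,
    List.map_map]
  rfl

theorem pvQuery_eq_sum (l : List Char) (t : PvTrie)
    (h : ∀ p, p <+: l → (pvNodeAt? t p).isSome) :
    pvQuery t l = ((pvPrefixes l).map (pvCntAt t)).sum := by
  induction l generalizing t with
  | nil => cases t <;> simp [pvQuery, pvPrefixes]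
  | cons a as ih =>
    cases t with
    | node c ch =>
      have hsome : (pvNodeAt? (.node c ch) [a]).isSome := h [a] (by simp)
      simp only [pvNodeAt?] at hsome
      cases hf : pvFind? ch a with
      | none => rw [hf] at hsome; simp at hsome
      | some t' =>
        obtain ⟨cc, cch⟩ := t'
        have hq : pvQuery (.node c ch) (a :: as) = cc + pvQuery (.node cc cch) as := by
          show (match pvFind? ch a with
                | some t' => (match t' with | .node cc _ => cc) + pvQuery t' as
                | none => 0) = _
          rw [hf]
        have hsub : ∀ p, p <+: as → (pvNodeAt? (PvTrie.node cc cch) p).isSome := by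
          intro p hp
          have := h (a :: p) (by simpa [List.cons_prefix_cons] using hp)
          simpa [pvNodeAt?, hf] using this
        have hdesc : ∀ p, pvCntAt (.node c ch) (a :: p) = pvCntAt (PvTrie.node cc cch) p := by
          intro p; simp [pvCntAt, pvNodeAt?, hf]
        rw [hq, ih _ hsub, pvPrefixes_cons]
        simp only [List.map_cons, List.sum_cons, List.map_map, Function.comp_def, hdesc]
        rfl

-- count of a word list satisfying the nonempty-prefix predicate, as an Int
def pvMult (ws : List String) (p : List Char) : Int :=
  (ws.countP (fun w => decide (p ≠ [] ∧ p <+: w.toList)) : Int)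

theorem pvCntAt_build (ws : List String) (t : PvTrie) (p : List Char) :
    pvCntAt (ws.foldl (fun t w => pvInsert t w.toList) t) p = pvCntAt t p + pvMult ws p := by
  induction ws generalizing t with
  | nil => simp [pvMult]
  | cons w ws ih =>
    simp only [List.foldl_cons, ih, pvCntAt_insert, pvMult, List.countP_cons]
    push_cast
    split_ifs with h1 h2 <;> simp_all <;> omega

theorem pvNodeAt?_build (ws : List String) (t : PvTrie) (p : List Char)
    (h : (∃ w ∈ ws, p <+: w.toList) ∨ (pvNodeAt? t p).isSome) :
    (pvNodeAt? (ws.foldl (fun t w => pvInsert t w.toList) t) p).isSome := by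
  induction ws generalizing t with
  | nil =>
    rcases h with ⟨w, hw, -⟩ | h
    · simp at hw
    · simpa using h
  | cons w ws ih =>
    simp only [List.foldl_cons]
    apply ih
    rcases h with ⟨v, hv, hp⟩ | h
    · rcases List.mem_cons.mp hv with rfl | hv
      · exact Or.inr (pvNodeAt?_insert_isSome p v.toList t (Or.inl hp))
      · exact Or.inl ⟨v, hv, hp⟩
    · exact Or.inr (pvNodeAt?_insert_isSome p w.toList t (Or.inr h))

-- B-side: the pyRange/slice loop is the loop over pvPrefixes
theorem pvInnerFold {β : Type} (w : String) (g : β → List Char → β) (d : β) :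
    (PySem.List.pyRange 0 (PySem.Str.len w) 1).foldl
        (fun d i => g d (PySem.List.slice w.toList none (some (i + 1)))) d =
      (pvPrefixes w.toList).foldl g d := by
  rw [show PySem.Str.len w = (w.toList.length : Int) from by simp [PySem.Str.len_eq],
      PySem.List.pyRange_zero_natCast, List.foldl_map]
  rw [pvPrefixes, List.foldl_map]
  have hfun : (fun (d : β) (i : Nat) => g d (PySem.List.slice w.toList none (some ((i : Int) + 1)))) =
      (fun d i => g d (w.toList.take (i + 1))) := by
    funext d i
    rw [show ((i : Int) + 1) = ((i + 1 : Nat) : Int) from by push_cast; ring,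
        PySem.List.slice_to_natCast]
  rw [hfun]

theorem pvPhase1 (w : String) (d : PySem.Dict (List Char) Int) :
    (PySem.List.pyRange 0 (PySem.Str.len w) 1).foldl
      (fun d i => d.insert (PySem.List.slice w.toList none (some (i + 1)))
        (d.getD (PySem.List.slice w.toList none (some (i + 1))) 0 + 1)) d
    = (pvPrefixes w.toList).foldl (fun d p => d.insert p (d.getD p 0 + 1)) d :=
  pvInnerFold w (fun d p => d.insert p (d.getD p 0 + 1)) d

theorem pvPhase2 (counts : PySem.Dict (List Char) Int) (w : String) :
    (PySem.List.pyRange 0 (PySem.Str.len w) 1).foldl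
      (fun acc i => acc + counts.getD (PySem.List.slice w.toList none (some (i + 1))) 0) 0
    = (pvPrefixes w.toList).foldl (fun acc p => acc + counts.getD p 0) 0 :=
  pvInnerFold w (fun acc p => acc + counts.getD p 0) 0

theorem pvCount_prefixes (vs p : List Char) :
    (pvPrefixes vs).count p = if p ≠ [] ∧ p <+: vs then 1 else 0 := by
  induction vs generalizing p with
  | nil => simp [pvPrefixes]
  | cons a as ih =>
    rw [pvPrefixes_cons]
    cases p with
    | nil =>
      simp only [ne_eq, not_true_eq_false, false_and, if_false]
      rw [List.count_cons]
      simp only [beq_iff_eq]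
      rw [List.count_eq_zero.mpr (by simp)]
      simp
    | cons b bs =>
      by_cases hba : b = a
      · subst hba
        rw [List.count_cons]
        have hmap : ((pvPrefixes as).map (b :: ·)).count (b :: bs) = (pvPrefixes as).count bs :=
          List.count_map_of_injective _ _ (fun x y h => by simpa using h) _
        rw [hmap, ih]
        simp only [List.cons_prefix_cons, beq_iff_eq, List.cons.injEq]
        cases bs with
        | nil => simp
        | cons b2 bs2 => simp
      · have hnp : ¬(b :: bs <+: a :: as) := by
          rw [List.cons_prefix_cons]; rintro ⟨h, -⟩; exact hba h
        rw [List.count_cons, List.count_eq_zero.mpr (by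
          simp only [List.mem_map]
          rintro ⟨x, -, h⟩
          exact hba ((List.cons_eq_cons.mp h).1.symm))]
        simp [hnp]
        exact fun h => absurd h.symm hba

theorem pvCount_flatMap {α : Type} [BEq α] (l : List String)
    (f : String → List α) (p : α) :
    (l.flatMap f).count p = (l.map (fun x => (f x).count p)).sum := by
  induction l with
  | nil => simp
  | cons x xs ih => simp [List.flatMap_cons, List.count_append, ih]

theorem pvFoldlAdd (l : List (List Char)) (f : List Char → Int) (a : Int) :
    l.foldl (fun acc p => acc + f p) a = a + (l.map f).sum := by
  induction l generalizing a with
  | nil => simp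
  | cons x xs ih => simp [ih, add_assoc]

-- the flat counter of B holds exactly pvMult
theorem pvSumCount (ws : List String) (p : List Char) :
    (ws.map (fun w => (pvPrefixes w.toList).count p)).sum
      = ws.countP (fun w => decide (p ≠ [] ∧ p <+: w.toList)) := by
  induction ws with
  | nil => rfl
  | cons w ws ih =>
    rw [List.map_cons, List.sum_cons, ih, List.countP_cons, pvCount_prefixes]
    by_cases h : p ≠ [] ∧ p <+: w.toList <;> simp [h] <;> omega

theorem pvCountsGetD (words : List String) (p : List Char) :
    (words.foldl (fun d w =>
        (pvPrefixes w.toList).foldl (fun d p => d.insert p (d.getD p 0 + 1)) d)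
      PySem.Dict.empty).getD p 0 = pvMult words p := by
  rw [← List.foldl_flatMap, PySem.Dict.getD_foldl_insert_add_one, PySem.Dict.getD_empty,
      pvCount_flatMap, pvSumCount, zero_add]
  rfl

-- ===== VERDICT (by name: the statement is the Claim_ definition above) =====
theorem solution_1674_4_1_spec : Claim_equal_solution_1674_4_1 := by
  intro words _
  unfold Spec_solution_1674_4_1 solution_1674_4_1 solution_1674_4_1_alt
  apply List.map_congr_left
  intro w hw
  simp only [pvPhase1, pvPhase2]
  rw [pvFoldlAdd, zero_add,
      pvQuery_eq_sum _ _ (fun p hp => pvNodeAt?_build words _ p (Or.inl ⟨w, hw, hp⟩))]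
  congr 1
  apply List.map_congr_left
  intro p hp
  rw [pvCountsGetD, pvCntAt_build]
  have h0 : pvCntAt (.node 0 .nil) p = 0 := by
    cases p <;> simp [pvCntAt, pvNodeAt?, pvCnt, pvFind?]
  rw [h0, zero_add]
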